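-- pv_equiv track=rewrite | github.com/TerranceJYiii/Programming_challenges | AdventOfCode/AOC15/Task20_2.py | find_factor_sum
-- ===== SOURCE A (Python) =====
-- from math import sqrt
--
-- def find_factor_sum(n):
--     factors = []
--     for i in range(1, int(sqrt(n))+1):
--         if not n % i:
--             factors.append(i)
--             n_i = n//i
--             if i != n_i:
--                 factors.append(n_i)
--
--     sum = 0
--     limit = n // 50
--     for each in factors:
--         if each > limit:
--             sum += each
--     return sum
-- ===== SOURCE B (Python) =====
-- def find_factor_sum(n):
--     # divisors d of n with d > n//50 are exactly n//c for the cofactors c in 1..49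
--     total = 0
--     for c in range(1, 50):
--         if n % c == 0:
--             total += n // c
--     return total
-- ===== Notes on version B (the rewrite author's own statement) =====
-- stated objective: faster
-- what changed: Instead of trial-dividing up to sqrt(n) to collect all divisors and then filtering those above n//50, B enumerates the cofactors c = 1..49 directly and sums n//c whenever c divides n, since d > n//50 iff n/d < 50 for divisors d.
import Mathlib
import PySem

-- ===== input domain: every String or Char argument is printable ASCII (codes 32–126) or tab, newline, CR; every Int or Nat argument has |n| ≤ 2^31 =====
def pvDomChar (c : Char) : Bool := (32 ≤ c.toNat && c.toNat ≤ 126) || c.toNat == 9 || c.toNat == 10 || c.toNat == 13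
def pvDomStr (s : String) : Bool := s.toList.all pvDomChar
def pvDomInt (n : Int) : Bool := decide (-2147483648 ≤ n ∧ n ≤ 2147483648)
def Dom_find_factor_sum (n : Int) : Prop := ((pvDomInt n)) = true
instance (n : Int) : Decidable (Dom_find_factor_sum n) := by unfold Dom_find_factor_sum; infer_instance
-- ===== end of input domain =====

-- B replaces A's sqrt-bounded trial division + filter by a direct enumeration of the 49
-- possible cofactors (faster: bounded work instead of O(sqrt n) trial divisions).

-- ===== PORT A =====
-- int(sqrt(n)) of Python: for 0 ≤ n ≤ 2^31 math.sqrt is a correctly rounded double and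
-- int(math.sqrt(n)) equals the integer square root, so Nat.sqrt is exact on the admitted domain.
def pyIsqrt (n : Int) : Int := (Nat.sqrt n.toNat : Int)

def find_factor_sum (n : Int) : Int :=
  let factors : List Int :=
    (PySem.List.pyRange 1 (pyIsqrt n + 1) 1).foldl
      (fun factors i =>
        if PySem.Int.mod n i = 0 then
          let factors := factors ++ [i]
          let n_i := PySem.Int.floordiv n i
          if i ≠ n_i then factors ++ [n_i] else factors
        else factors) []
  let limit := PySem.Int.floordiv n 50
  factors.foldl (fun sum each => if each > limit then sum + each else sum) 0

-- ===== PORT B =====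
def find_factor_sum_alt (n : Int) : Int :=
  (PySem.List.pyRange 1 50 1).foldl
    (fun total c =>
      if PySem.Int.mod n c = 0 then total + PySem.Int.floordiv n c else total) 0

-- ===== PRECONDITION & SPEC =====
-- Pre_ excludes exactly n < 0, where A raises ValueError (math.sqrt of a negative number).
def Pre_find_factor_sum (n : Int) : Prop := 0 ≤ n
instance (n : Int) : Decidable (Pre_find_factor_sum n) := by unfold Pre_find_factor_sum; infer_instance
def pvWitness_find_factor_sum : Int := 12

def Spec_find_factor_sum (n : Int) (out : Int) : Prop := out = find_factor_sum_alt n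
instance (n : Int) (out : Int) : Decidable (Spec_find_factor_sum n out) := by unfold Spec_find_factor_sum; infer_instance

-- ===== CLAIM (what is proved, stated in full; the proofs are below) =====
def Claim_equal_find_factor_sum : Prop := ∀ (n : Int), Dom_find_factor_sum n → Pre_find_factor_sum n → Spec_find_factor_sum n (find_factor_sum n)

-- ===== LEMMAS AND PROOFS =====

-- ℕ-level contribution of one loop index of A (i runs over 1..sqrt m)
def aContribN (m i : ℕ) : ℕ :=
  if m % i = 0 then
    (if m / 50 < i then i else 0) + (if i ≠ m / i ∧ m / 50 < m / i then m / i else 0)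
  else 0

-- ℕ-level contribution of one loop index of B (c runs over 1..49)
def bContribN (m c : ℕ) : ℕ := if m % c = 0 then m / c else 0

-- small divisor has large cofactor
lemma cofactor_large (m d : ℕ) (hm : 0 < m) (hd0 : 0 < d) (hd : d ≤ Nat.sqrt m) :
    Nat.sqrt m ≤ m / d := by
  have h1 : m / Nat.sqrt m ≤ m / d := Nat.div_le_div_left hd hd0
  have hs : 0 < Nat.sqrt m := Nat.sqrt_pos.mpr hm
  have h2 : Nat.sqrt m ≤ m / Nat.sqrt m :=
    (Nat.le_div_iff_mul_le hs).mpr (Nat.sqrt_le m)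
  omega

-- large divisor has small cofactor
lemma cofactor_small (m d : ℕ) (hd : Nat.sqrt m < d) : m / d ≤ Nat.sqrt m := by
  have h1 : m / d ≤ m / (Nat.sqrt m + 1) := Nat.div_le_div_left hd (Nat.succ_pos _)
  have h2 : m / (Nat.sqrt m + 1) < Nat.sqrt m + 1 :=
    (Nat.div_lt_iff_lt_mul (Nat.succ_pos _)).mpr (Nat.lt_succ_sqrt m)
  omega

-- for a divisor below the root: distinct from its cofactor ↔ the cofactor is above the root
lemma ne_cofactor_iff (m d : ℕ) (hm : 0 < m) (hdvd : d ∣ m) (hd : d ≤ Nat.sqrt m) :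
    d ≠ m / d ↔ Nat.sqrt m < m / d := by
  constructor
  · intro hne
    have hd0' : 0 < d := Nat.pos_of_dvd_of_pos hdvd hm
    have h1 := cofactor_large m d hm hd0' hd
    rcases lt_or_eq_of_le h1 with h | h
    · exact h
    · exfalso
      have hd0 : 0 < d := Nat.pos_of_dvd_of_pos hdvd hm
      have hmul : d * (m / d) = m := Nat.mul_div_cancel' hdvd
      have hle : Nat.sqrt m * Nat.sqrt m ≤ m := Nat.sqrt_le m
      have : Nat.sqrt m ≤ d := by
        by_contra hcon
        push Not at hcon
        have : d * (m / d) < Nat.sqrt m * (m / d) := by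
          apply Nat.mul_lt_mul_of_lt_of_le hcon (le_refl _)
          omega
        rw [hmul, ← h] at this
        omega
      have hds : d = Nat.sqrt m := le_antisymm hd this
      omega
  · intro h hne
    rw [← hne] at h
    omega

-- reindex a sum over divisors by d ↦ m / d
lemma sum_div_bij (m : ℕ) (hm : m ≠ 0) (p q : ℕ → Prop) [DecidablePred p] [DecidablePred q]
    (hpq : ∀ d, d ∣ m → (p d ↔ q (m / d))) :
    ∑ d ∈ m.divisors.filter p, m / d = ∑ e ∈ m.divisors.filter q, e := by
  refine Finset.sum_nbij' (i := fun d => m / d) (j := fun e => m / e) ?_ ?_ ?_ ?_ ?_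
  · intro d hd
    simp only [Finset.mem_filter, Nat.mem_divisors] at hd ⊢
    exact ⟨⟨Nat.div_dvd_of_dvd hd.1.1, hm⟩, (hpq d hd.1.1).mp hd.2⟩
  · intro e he
    simp only [Finset.mem_filter, Nat.mem_divisors] at he ⊢
    refine ⟨⟨Nat.div_dvd_of_dvd he.1.1, hm⟩, ?_⟩
    rw [hpq (m / e) (Nat.div_dvd_of_dvd he.1.1), Nat.div_div_self he.1.1 hm]
    exact he.2
  · intro d hd
    simp only [Finset.mem_filter, Nat.mem_divisors] at hd
    exact Nat.div_div_self hd.1.1 hm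
  · intro e he
    simp only [Finset.mem_filter, Nat.mem_divisors] at he
    exact Nat.div_div_self he.1.1 hm
  · intro d _
    rfl

lemma ico_filter_divisors (m t : ℕ) (hm : 0 < m) :
    (Finset.Ico 1 (t + 1)).filter (· ∣ m) = m.divisors.filter (· ≤ t) := by
  ext i
  simp only [Finset.mem_filter, Finset.mem_Ico, Nat.mem_divisors]
  constructor
  · rintro ⟨⟨h1, h2⟩, h3⟩
    exact ⟨⟨h3, by omega⟩, by omega⟩
  · rintro ⟨⟨h1, _⟩, h2⟩
    have := Nat.pos_of_dvd_of_pos h1 hm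
    exact ⟨⟨by omega, by omega⟩, h1⟩

-- the key identity between the two summations, on ℕ
lemma key (m : ℕ) :
    ∑ i ∈ Finset.Ico 1 (Nat.sqrt m + 1), aContribN m i
      = ∑ c ∈ Finset.Ico 1 50, bContribN m c := by
  rcases Nat.eq_zero_or_pos m with hm | hm
  · subst hm; simp [aContribN, bContribN]
  have hm' : m ≠ 0 := by omega
  -- turn ite sums into sums over divisor filters
  have hmod : ∀ i ∈ Finset.Ico 1 (Nat.sqrt m + 1), aContribN m i =
      if i ∣ m then ((if m / 50 < i then i else 0) + (if i ≠ m / i ∧ m / 50 < m / i then m / i else 0)) else 0 := by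
    intro i hi
    unfold aContribN
    exact if_congr (Nat.dvd_iff_mod_eq_zero).symm rfl rfl
  have hmodb : ∀ c ∈ Finset.Ico 1 50, bContribN m c = if c ∣ m then m / c else 0 := by
    intro c hc
    unfold bContribN
    exact if_congr (Nat.dvd_iff_mod_eq_zero).symm rfl rfl
  rw [Finset.sum_congr rfl hmod, Finset.sum_congr rfl hmodb,
      ← Finset.sum_filter, ← Finset.sum_filter,
      ico_filter_divisors m (Nat.sqrt m) hm, ico_filter_divisors m 49 hm]
  -- LHS: split the pairwise contributions
  rw [Finset.sum_add_distrib]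
  -- first piece
  have e1 : ∑ d ∈ m.divisors.filter (· ≤ Nat.sqrt m), (if m / 50 < d then d else 0)
      = ∑ d ∈ m.divisors.filter (fun d => d ≤ Nat.sqrt m ∧ m / 50 < d), d := by
    rw [← Finset.sum_filter, Finset.filter_filter]
  -- second piece: rewrite the d ≠ m/d test, then reindex by the cofactor
  have e2 : ∑ d ∈ m.divisors.filter (· ≤ Nat.sqrt m),
        (if d ≠ m / d ∧ m / 50 < m / d then m / d else 0)
      = ∑ d ∈ m.divisors.filter (fun d => Nat.sqrt m < d ∧ m / 50 < d), d := by
    have step1 : ∑ d ∈ m.divisors.filter (· ≤ Nat.sqrt m),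
          (if d ≠ m / d ∧ m / 50 < m / d then m / d else 0)
        = ∑ d ∈ m.divisors.filter (fun d => d ≤ Nat.sqrt m ∧ (Nat.sqrt m < m / d ∧ m / 50 < m / d)), m / d := by
      rw [← Finset.sum_filter, Finset.filter_filter]
      apply Finset.sum_congr
      · apply Finset.filter_congr
        intro d hd
        simp only [Nat.mem_divisors] at hd
        constructor
        · rintro ⟨hds, hne, hL⟩
          exact ⟨hds, (ne_cofactor_iff m d hm hd.1 hds).mp hne, hL⟩
        · rintro ⟨hds, hgt, hL⟩
          exact ⟨hds, (ne_cofactor_iff m d hm hd.1 hds).mpr hgt, hL⟩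
      · intro d _; rfl
    rw [step1]
    apply sum_div_bij m hm'
    intro d hdvd
    constructor
    · rintro ⟨_, h2, h3⟩; exact ⟨h2, h3⟩
    · rintro ⟨h2, h3⟩
      refine ⟨?_, h2, h3⟩
      by_contra hcon
      push Not at hcon
      have := cofactor_small m d hcon
      omega
  rw [e1, e2]
  -- RHS: reindex by the cofactor
  have e3 : ∑ c ∈ m.divisors.filter (· ≤ 49), m / c
      = ∑ d ∈ m.divisors.filter (fun d => m / 50 < d), d := by
    apply sum_div_bij m hm'
    intro c hdvd
    have hc0 : 0 < c := Nat.pos_of_dvd_of_pos hdvd hm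
    have hmul : c * (m / c) = m := Nat.mul_div_cancel' hdvd
    have hq0 : 0 < m / c := Nat.div_pos (Nat.le_of_dvd hm hdvd) hc0
    rw [Nat.div_lt_iff_lt_mul (by norm_num : (0:ℕ) < 50)]
    constructor
    · intro hle
      calc m = c * (m / c) := hmul.symm
        _ ≤ 49 * (m / c) := Nat.mul_le_mul_right _ hle
        _ < (m / c) * 50 := by omega
    · intro hlt
      by_contra hcon
      push Not at hcon
      have h1 : m / c ≤ m / 50 := Nat.div_le_div_left (by omega) (by norm_num)
      have h2 : m / 50 * 50 ≤ m := Nat.div_mul_le_self m 50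
      omega
  rw [e3]
  -- combine the two LHS pieces into the single filter m/50 < d
  have := Finset.sum_filter_add_sum_filter_not (m.divisors.filter (fun d => m / 50 < d))
      (fun d => d ≤ Nat.sqrt m) (fun d => d)
  rw [Finset.filter_filter, Finset.filter_filter] at this
  calc ∑ d ∈ m.divisors.filter (fun d => d ≤ Nat.sqrt m ∧ m / 50 < d), d
        + ∑ d ∈ m.divisors.filter (fun d => Nat.sqrt m < d ∧ m / 50 < d), d
      = ∑ d ∈ m.divisors.filter (fun d => m / 50 < d ∧ d ≤ Nat.sqrt m), d
        + ∑ d ∈ m.divisors.filter (fun d => m / 50 < d ∧ ¬ d ≤ Nat.sqrt m), d := by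
        congr 1
        · congr 1; apply Finset.filter_congr; intro d _; constructor <;> (rintro ⟨h1, h2⟩; exact ⟨h2, h1⟩)
        · congr 1; apply Finset.filter_congr; intro d _; constructor
          · rintro ⟨h1, h2⟩; exact ⟨h2, by omega⟩
          · rintro ⟨h1, h2⟩; exact ⟨by omega, h1⟩
    _ = ∑ d ∈ m.divisors.filter (fun d => m / 50 < d), d := this

-- a sum over List.range is the corresponding Finset.range sum
lemma list_range_map_sum (N : ℕ) (F : ℕ → ℤ) :
    ((List.range N).map F).sum = ∑ k ∈ Finset.range N, F k := rfl

-- pointwise value of B's loop body, as a cast of bContribN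
lemma b_point (m j : ℕ) :
    (if PySem.Int.mod (m : Int) (j : Int) = 0 then PySem.Int.floordiv (m : Int) (j : Int) else 0)
      = ((bContribN m j : ℕ) : Int) := by
  simp only [PySem.Int.mod_natCast, PySem.Int.floordiv_natCast, bContribN, Nat.cast_eq_zero]
  split <;> simp

-- evaluate port B to the ℕ-level summation
lemma B_eval (m : ℕ) :
    find_factor_sum_alt (m : Int) = ((∑ c ∈ Finset.Ico 1 50, bContribN m c : ℕ) : Int) := by
  unfold find_factor_sum_alt
  have hstep : (fun (total c : Int) =>
      if PySem.Int.mod (m : Int) c = 0 then total + PySem.Int.floordiv (m : Int) c else total)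
      = fun total c => total + (if PySem.Int.mod (m : Int) c = 0 then PySem.Int.floordiv (m : Int) c else 0) := by
    funext t c; split <;> simp
  rw [hstep, PySem.List.foldl_add, PySem.List.pyRange_one, List.map_map, zero_add,
      list_range_map_sum, Finset.sum_Ico_eq_sum_range, Nat.cast_sum]
  apply Finset.sum_congr rfl
  intro k _
  simp only [Function.comp]
  have h : (1 : Int) + (k : Int) = ((1 + k : ℕ) : Int) := by push_cast; ring
  rw [h, b_point]

-- pointwise value of A's loop body, as a cast of aContribN
lemma a_point (m j : ℕ) :
    (((if PySem.Int.mod (m : Int) (j : Int) = 0 then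
        (if (j : Int) ≠ PySem.Int.floordiv (m : Int) (j : Int) then
          [(j : Int), PySem.Int.floordiv (m : Int) (j : Int)] else [(j : Int)])
      else ([] : List Int)).map
        (fun e => if PySem.Int.floordiv (m : Int) 50 < e then e else 0)).sum)
      = ((aContribN m j : ℕ) : Int) := by
  have h50 : PySem.Int.floordiv (m : Int) 50 = ((m / 50 : ℕ) : Int) := by
    exact_mod_cast PySem.Int.floordiv_natCast m 50
  rw [h50]
  simp only [PySem.Int.mod_natCast, PySem.Int.floordiv_natCast, aContribN,
    Nat.cast_eq_zero, ne_eq, Nat.cast_inj]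
  split_ifs with hmod hne <;>
    simp only [List.map_cons, List.map_nil, List.sum_cons, List.sum_nil, Nat.cast_lt, add_zero] <;>
    (try split_ifs) <;>
    first
      | (exfalso; tauto)
      | (push_cast; ring)
      | omega

-- evaluate port A to the ℕ-level summation
lemma A_eval (m : ℕ) :
    find_factor_sum (m : Int) = ((∑ i ∈ Finset.Ico 1 (Nat.sqrt m + 1), aContribN m i : ℕ) : Int) := by
  unfold find_factor_sum pyIsqrt
  rw [Int.toNat_natCast]
  dsimp only
  have h1 : (fun (factors : List Int) (i : Int) =>
      if PySem.Int.mod (m : Int) i = 0 then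
        let factors' := factors ++ [i]
        let n_i := PySem.Int.floordiv (m : Int) i
        if i ≠ n_i then factors' ++ [n_i] else factors'
      else factors)
      = fun factors i => factors ++ (if PySem.Int.mod (m : Int) i = 0 then
          (if i ≠ PySem.Int.floordiv (m : Int) i then [i, PySem.Int.floordiv (m : Int) i] else [i])
        else []) := by
    funext fs i
    by_cases hc : PySem.Int.mod (m : Int) i = 0
    · rw [if_pos hc, if_pos hc]
      (try dsimp only)
      by_cases hne : i ≠ PySem.Int.floordiv (m : Int) i
      · rw [if_pos hne, if_pos hne, List.append_assoc]
        rfl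
      · rw [if_neg hne, if_neg hne]
    · rw [if_neg hc, if_neg hc]; simp
  have h2 : (fun (sum each : Int) =>
      if each > PySem.Int.floordiv (m : Int) 50 then sum + each else sum)
      = fun sum each => sum + (if PySem.Int.floordiv (m : Int) 50 < each then each else 0) := by
    funext a e; split <;> simp
  rw [h1, PySem.List.foldl_append_eq_flatMap, List.nil_append, h2, PySem.List.foldl_add,
      List.map_flatMap, List.flatMap_def, List.sum_flatten, List.map_map,
      PySem.List.pyRange_one, List.map_map, zero_add]
  have hN : (((Nat.sqrt m : Int) + 1 - 1)).toNat = Nat.sqrt m := by simp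
  rw [hN, list_range_map_sum, Finset.sum_Ico_eq_sum_range, Nat.cast_sum]
  apply Finset.sum_congr rfl
  intro k _
  simp only [Function.comp]
  have h : (1 : Int) + (k : Int) = ((1 + k : ℕ) : Int) := by push_cast; ring
  rw [h, a_point]

-- ===== VERDICT (by name: the statement is the Claim_ definition above) =====
theorem find_factor_sum_spec : Claim_equal_find_factor_sum := by
  intro n _ hpre
  unfold Spec_find_factor_sum
  have hn : n = ((n.toNat : ℕ) : Int) := (Int.toNat_of_nonneg hpre).symm
  rw [hn, A_eval, B_eval, key]
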